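-- pv_equiv track=rewrite | github.com/nguyen-brat/uit-dc-2024 | run_llm.py | remove_redundancy
-- ===== SOURCE A (Python) =====
-- def remove_redundancy(s, n=4):
--     result = []
--     i = 0
--     while i < len(s):
--         # Find the longest repeating substring starting at index i
--         for j in range(len(s), i, -1):
--             substring = s[i:j]
--             if len(substring) * n <= len(s[i:]) and s[i:i+len(substring)*n] == substring * n:
--                 # If the substring repeats n or more times, skip it
--                 i += len(substring) * n
--                 break
--         else:
--             # If no repeating substring is found, add the current character to the result
--             result.append(s[i])
--             i += 1
--
--     return ''.join(result)
-- ===== SOURCE B (Python) =====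
-- def remove_redundancy(s, n=4):
--     # Two staged passes instead of A's on-line nested slice comparisons:
--     # (1) for each block length L, one backward run-length DP pass computes the
--     #     self-overlap match run (run = lcp of s[i:] and s[i+L:]) and records in
--     #     best[i] the largest L whose n-fold repeat starts at i;
--     # (2) a linear emit scan consumes the precomputed skip table.
--     m = len(s)
--     best = [0] * m
--     for L in range(1, m // n + 1):
--         run = 0
--         for i in range(m - L, -1, -1):
--             run = run + 1 if i + L < m and s[i] == s[i + L] else 0
--             if n * L <= m - i and run >= (n - 1) * L:
--                 best[i] = L
--     out = []
--     i = 0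
--     while i < m:
--         if best[i]:
--             i += n * best[i]
--         else:
--             out.append(s[i])
--             i += 1
--     return ''.join(out)
-- ===== Notes on version B (the rewrite author's own statement) =====
-- stated objective: faster
-- what changed: B replaces A's on-line nested search with slice building/replication by two staged passes: for each block length L a backward run-length DP pass (run = self-overlap lcp of s[i:] and s[i+L:]) fills a skip table best[i] with the largest L whose n-fold repeat starts at i, and then a single linear emit scan consumes the table.
-- outside the precondition, e.g. on remove_redundancy('', 0): A returns '', B raises ZeroDivisionError
import Mathlib
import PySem

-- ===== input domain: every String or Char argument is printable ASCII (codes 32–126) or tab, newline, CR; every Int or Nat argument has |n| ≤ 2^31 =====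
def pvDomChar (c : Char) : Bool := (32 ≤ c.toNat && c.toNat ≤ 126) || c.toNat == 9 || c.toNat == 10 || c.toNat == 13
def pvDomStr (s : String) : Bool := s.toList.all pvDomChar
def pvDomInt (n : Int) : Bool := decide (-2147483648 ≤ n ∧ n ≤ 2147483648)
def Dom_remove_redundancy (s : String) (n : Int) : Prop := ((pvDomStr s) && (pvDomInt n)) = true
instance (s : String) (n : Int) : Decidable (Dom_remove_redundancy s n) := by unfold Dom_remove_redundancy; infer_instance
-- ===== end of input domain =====

-- B replaces A's on-line nested slice-build-and-compare search by two staged passes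
-- (a per-block-length backward run-length DP filling a skip table, then a linear emit scan);
-- equivalence is proved on Pre_ (A never returns for n ≤ 0 on nonempty input; for the empty
-- string with n = 0, B's m//n raises where A accidentally returns the empty string).


-- ===== PORT A =====
-- Python `substring * n` (string repetition; empty for n ≤ 0)
def pyStrMul (xs : List Char) (n : Int) : List Char := (List.replicate n.toNat xs).flatten

-- the body of A's inner `for j … if …` condition
def condA (cs : List Char) (n i j : Int) : Bool :=
  let sub := PySem.List.slice cs (some i) (some j)
  decide ((sub.length : Int) * n ≤ ((PySem.List.slice cs (some i) none).length : Int)) &&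
    decide (PySem.List.slice cs (some i) (some (i + (sub.length : Int) * n)) = pyStrMul sub n)

-- `for j in range(len(s), i, -1): … break / else` = first j satisfying the condition
def findA (cs : List Char) (n i : Int) : Option Int :=
  (PySem.List.pyRange (cs.length : Int) i (-1)).find? (condA cs n i)

-- A's while-loop; fuel (len+1) dominates the iteration count whenever A terminates
def loopA (cs : List Char) (n : Int) : Nat → Int → List Char → List Char
  | 0, _, res => res
  | fuel+1, i, res =>
    if i < (cs.length : Int) then
      match findA cs n i with
      | some j =>
        let sub := PySem.List.slice cs (some i) (some j)
        loopA cs n fuel (i + (sub.length : Int) * n) res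
      | none => loopA cs n fuel (i + 1) (res ++ (PySem.List.pyGet? cs i).toList)
    else res

def remove_redundancy (s : String) (n : Int) : String :=
  String.ofList (loopA s.toList n (s.toList.length + 1) 0 [])

-- ===== PORT B =====
-- body of the inner pass `run = run + 1 if i + L < m and s[i] == s[i+L] else 0; if …: best[i] = L`
def stepB (cs : List Char) (n : Int) (L : Nat) (st : Nat × List Nat) (i : Nat) : Nat × List Nat :=
  let run := if i + L < cs.length ∧ cs[i]? = cs[i+L]? then st.1 + 1 else 0
  (run,
    if (n * (L : Int) ≤ (cs.length : Int) - (i : Int) ∧ (n - 1) * (L : Int) ≤ (run : Int))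
    then st.2.set i L else st.2)

-- inner pass `for i in range(m - L, -1, -1): …` (state = (run, best))
def innerB (cs : List Char) (n : Int) (L : Nat) (best0 : List Nat) : List Nat :=
  (((List.range (cs.length - L + 1)).map (fun t => cs.length - L - t)).foldl
    (stepB cs n L) (0, best0)).2

-- `best = [0]*m; for L in range(1, m//n + 1): …` (the skip table)
def bestTable (cs : List Char) (n : Int) : List Nat :=
  ((List.range (PySem.Int.floordiv (cs.length : Int) n).toNat).map (· + 1)).foldl
    (fun best L => innerB cs n L best) (List.replicate cs.length 0)

-- the emit scan `while i < m: if best[i]: i += n*best[i] else: out.append(s[i]); i += 1`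
def loopC (cs : List Char) (n : Int) (best : List Nat) : Nat → Nat → List Char → List Char
  | 0, _, out => out
  | fuel+1, i, out =>
    if i < cs.length then
      let L := best.getD i 0
      if L ≠ 0 then loopC cs n best fuel (i + n.toNat * L) out
      else loopC cs n best fuel (i + 1) (out ++ (cs[i]?).toList)
    else out

def remove_redundancy_alt (s : String) (n : Int) : String :=
  String.ofList (loopC s.toList n (bestTable s.toList n) (s.toList.length + 1) 0 [])

-- ===== PRECONDITION & SPEC =====
-- A never returns for n ≤ 0 on a nonempty string (its position never advances: an infinite
-- loop); on the empty string with n ≤ 0, A returns the empty string without looking at n, but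
-- B's `m // n` raises ZeroDivisionError at n = 0, so Pre_ keeps the empty string only for n ≠ 0.
def Pre_remove_redundancy (s : String) (n : Int) : Prop := 1 ≤ n ∨ (s = "" ∧ n ≠ 0)
instance (s : String) (n : Int) : Decidable (Pre_remove_redundancy s n) := by
  unfold Pre_remove_redundancy; infer_instance
def pvWitness_remove_redundancy : String × Int := ("xaaaay", 2)

def Spec_remove_redundancy (s : String) (n : Int) (out : String) : Prop := out = remove_redundancy_alt s n
instance (s : String) (n : Int) (out : String) : Decidable (Spec_remove_redundancy s n out) := by unfold Spec_remove_redundancy; infer_instance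

-- ===== CLAIM (what is proved, stated in full; the proofs are below) =====
def Claim_equal_remove_redundancy : Prop := ∀ (s : String) (n : Int), Dom_remove_redundancy s n → Pre_remove_redundancy s n → Spec_remove_redundancy s n (remove_redundancy s n)

-- ===== LEMMAS AND PROOFS =====

-- `lcpD cs L i` = length of the longest common prefix of cs[i:] and cs[i+L:]
-- (the value B's `run` accumulator holds after processing index i)
def lcpD (cs : List Char) (L : Nat) (i : Nat) : Nat :=
  if h : i + L < cs.length ∧ cs[i]? = cs[i+L]? then lcpD cs L (i+1) + 1 else 0
termination_by cs.length - i
decreasing_by omega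

-- the (Nat-arithmetic) condition under which B's inner pass writes best[i] := L
def condN (cs : List Char) (nN L i : Nat) : Bool :=
  decide (nN * L + i ≤ cs.length ∧ (nN - 1) * L ≤ lcpD cs L i)

theorem condN_iff (cs : List Char) (nN L i : Nat) :
    condN cs nN L i = true ↔ (nN * L + i ≤ cs.length ∧ (nN - 1) * L ≤ lcpD cs L i) := by
  simp [condN]

-- the value best[i] holds after the passes L = 1 … q
def maxSkip (cs : List Char) (nN : Nat) : Nat → Nat → Nat
  | 0, _ => 0
  | q+1, i => if condN cs nN (q+1) i then q+1 else maxSkip cs nN q i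

-- proof-side restatement of B's repeat test as A's inner search over block lengths
def condB (cs : List Char) (n i L : Int) : Bool :=
  (PySem.List.pyRange 0 ((n - 1) * L) 1).all
    (fun k => PySem.List.pyGet? cs (i + L + k) == PySem.List.pyGet? cs (i + k))

def findB (cs : List Char) (n i : Int) : Option Int :=
  (PySem.List.pyRange (PySem.Int.floordiv ((cs.length : Int) - i) n) 0 (-1)).find? (condB cs n i)

-- ---------- A-side: findA = (i + ·) <$> findB ----------

-- prefix equality is pointwise equality below the cut
theorem take_eq_take_iff_ptwise (a b : List Char) (m : Nat) :
    a.take m = b.take m ↔ ∀ k < m, a[k]? = b[k]? := by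
  constructor
  · intro h k hk
    have := congrArg (fun l => l[k]?) h
    simpa [List.getElem?_take, hk] using this
  · intro h
    apply List.ext_getElem?
    intro k
    by_cases hk : k < m
    · simp [hk, h k hk]
    · simp [hk]

-- classic periodicity: an L-shift self-agreement yields the m-fold replication …
theorem periodic_rep (L : Nat) (hL : 1 ≤ L) (m : Nat) (u : List Char)
    (hlen : m * L ≤ u.length)
    (hsh : (u.drop L).take ((m - 1) * L) = u.take ((m - 1) * L)) :
    u.take (m * L) = (List.replicate m (u.take L)).flatten := by
  induction m generalizing u with
  | zero => simp
  | succ m ih =>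
    simp only [Nat.add_sub_cancel] at hsh
    have h1 : (m + 1) * L = L + m * L := by ring
    rw [h1, List.take_add, hsh]
    have ihh := ih u (by nlinarith) ?_
    · rw [ihh, List.replicate_succ, List.flatten_cons]
    · have := congrArg (fun l => List.take ((m - 1) * L) l) hsh
      simp only [List.take_take] at this
      have hmin : min ((m-1)*L) (m*L) = (m-1)*L := by
        have : (m-1)*L ≤ m*L := Nat.mul_le_mul_right L (by omega)
        omega
      rwa [hmin] at this

-- … and conversely
theorem shift_of_rep (L : Nat) (hL : 1 ≤ L) (m : Nat) (hm : 1 ≤ m) (u : List Char)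
    (hlen : m * L ≤ u.length)
    (hrep : u.take (m * L) = (List.replicate m (u.take L)).flatten) :
    (u.drop L).take ((m - 1) * L) = u.take ((m - 1) * L) := by
  obtain ⟨k, rfl⟩ : ∃ k, m = k + 1 := ⟨m - 1, by omega⟩
  simp only [Nat.add_sub_cancel] at *
  have hLlen : L ≤ u.length := le_trans (by nlinarith) hlen
  have hpl : (u.take L).length = L := by simp; omega
  have hflen : ((List.replicate k (u.take L)).flatten).length = k * L := by
    simp [hpl, Nat.mul_comm]
  have hdrop : (u.drop L).take (k * L) = (List.replicate k (u.take L)).flatten := by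
    have h1 : List.drop L (u.take ((k+1) * L)) = (u.drop L).take (k * L) := by
      rw [List.drop_take]
      congr 1
      have : (k+1)*L = k*L + L := by ring
      omega
    have h2 : List.drop L ((List.replicate (k+1) (u.take L)).flatten)
        = (List.replicate k (u.take L)).flatten := by
      rw [List.replicate_succ, List.flatten_cons, List.drop_left' hpl]
    rw [← h1, hrep, h2]
  have htake : u.take (k * L) = (List.replicate k (u.take L)).flatten := by
    have h1 : List.take (k * L) (u.take ((k+1) * L)) = u.take (k * L) := by
      rw [List.take_take]
      congr 1
      have : k*L ≤ (k+1)*L := by nlinarith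
      omega
    have h2 : List.take (k * L) ((List.replicate (k+1) (u.take L)).flatten)
        = (List.replicate k (u.take L)).flatten := by
      rw [List.replicate_succ', List.flatten_append, List.take_left' hflen]
    rw [← h1, hrep, h2]
  rw [hdrop, htake]

-- A's condition fails above rem//n (the n-fold block would not fit)
theorem condA_false (cs : List Char) (nN : Nat) (hn : 1 ≤ nN) (i : Nat)
    (L : Nat) (hq : (cs.length - i) / nN < L) (hLr : L ≤ cs.length - i) :
    condA cs (nN : Int) (i : Int) ((i : Int) + (L : Int)) = false := by
  unfold condA
  rw [PySem.List.slice_natCast_add, PySem.List.slice_from_natCast]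
  have hlen1 : ((cs.drop i).take L).length = L := by simp; omega
  have hlen2 : (cs.drop i).length = cs.length - i := by simp
  have hgt : ¬ ((L : Int) * (nN : Int) ≤ (((cs.drop i).length : Nat) : Int)) := by
    rw [hlen2]
    have h : cs.length - i < L * nN := (Nat.div_lt_iff_lt_mul (by omega)).mp hq
    exact_mod_cast Nat.not_le.mpr h
  simp only [hlen1]
  rw [decide_eq_false hgt, Bool.false_and]

-- the two inner conditions agree for block lengths 1..rem//n
theorem condA_eq_condB (cs : List Char) (nN : Nat) (hn : 1 ≤ nN) (i : Nat)
    (L : Nat) (hL : 1 ≤ L) (hLq : L ≤ (cs.length - i) / nN) :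
    condA cs (nN : Int) (i : Int) ((i : Int) + (L : Int)) = condB cs (nN : Int) (i : Int) (L : Int) := by
  have hrem : L * nN ≤ cs.length - i :=
    le_trans (Nat.mul_le_mul_right nN hLq) (Nat.div_mul_le_self _ _)
  have hLrem : L ≤ cs.length - i := le_trans (Nat.le_mul_of_pos_right L (by omega)) hrem
  have hulen : (cs.drop i).length = cs.length - i := by simp
  have hA : (condA cs (nN : Int) (i : Int) ((i : Int) + (L : Int)) = true) ↔
      ((cs.drop i).take (L * nN) = (List.replicate nN ((cs.drop i).take L)).flatten) := by
    unfold condA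
    rw [PySem.List.slice_natCast_add, PySem.List.slice_from_natCast]
    have hlen1 : ((cs.drop i).take L).length = L := by simp [hulen]; omega
    have hle : ((L : Int) * (nN : Int) ≤ (((cs.drop i).length : Nat) : Int)) := by
      rw [hulen]; exact_mod_cast hrem
    simp only [hlen1]
    rw [decide_eq_true hle, Bool.true_and]
    have hcast : ((i : Int) + (L : Int) * (nN : Int)) = ((i : Int) + ((L * nN : Nat) : Int)) := by
      push_cast; ring
    rw [hcast, PySem.List.slice_natCast_add]
    unfold pyStrMul
    simp only [Int.toNat_natCast]
    exact decide_eq_true_iff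
  have hB : (condB cs (nN : Int) (i : Int) (L : Int) = true) ↔
      (∀ k < (nN - 1) * L, (cs.drop i)[L + k]? = (cs.drop i)[k]?) := by
    unfold condB
    rw [List.all_eq_true]
    constructor
    · intro h k hk
      have hmem : ((k : Nat) : Int) ∈ PySem.List.pyRange 0 (((nN : Int) - 1) * (L : Int)) 1 := by
        rw [PySem.List.mem_pyRange_one]
        constructor
        · positivity
        · have : ((nN : Int) - 1) * (L : Int) = (((nN - 1) * L : Nat) : Int) := by
            push_cast [Nat.cast_sub hn]; ring
          rw [this]; exact_mod_cast hk
      have h2 := h _ hmem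
      rw [show ((i : Int) + (L : Int) + (k : Int)) = (((i + L + k : Nat)) : Int) by push_cast; ring,
          show ((i : Int) + (k : Int)) = (((i + k : Nat)) : Int) by push_cast; ring] at h2
      rw [PySem.List.pyGet?_natCast, PySem.List.pyGet?_natCast, beq_iff_eq] at h2
      rw [List.getElem?_drop, List.getElem?_drop]
      rw [show i + (L + k) = i + L + k by ring, h2]
    · intro h x hx
      have hb := PySem.List.mem_pyRange_one.mp hx
      obtain ⟨k, rfl⟩ : ∃ k : Nat, x = (k : Int) := ⟨x.toNat, by omega⟩
      have hk : k < (nN - 1) * L := by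
        have : ((nN : Int) - 1) * (L : Int) = (((nN - 1) * L : Nat) : Int) := by
          push_cast [Nat.cast_sub hn]; ring
        rw [this] at hb
        exact_mod_cast hb.2
      have h2 := h k hk
      rw [List.getElem?_drop, List.getElem?_drop] at h2
      rw [show ((i : Int) + (L : Int) + (k : Int)) = (((i + (L + k) : Nat)) : Int) by push_cast; ring,
          show ((i : Int) + (k : Int)) = (((i + k : Nat)) : Int) by push_cast; ring]
      rw [PySem.List.pyGet?_natCast, PySem.List.pyGet?_natCast, beq_iff_eq]
      exact h2
  have hmid : ((cs.drop i).take (L * nN) = (List.replicate nN ((cs.drop i).take L)).flatten) ↔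
      (∀ k < (nN - 1) * L, (cs.drop i)[L + k]? = (cs.drop i)[k]?) := by
    have hlen' : nN * L ≤ (cs.drop i).length := by rw [hulen]; simpa [Nat.mul_comm] using hrem
    rw [show L * nN = nN * L by ring]
    constructor
    · intro hrep
      have := shift_of_rep L hL nN hn (cs.drop i) hlen' hrep
      rw [take_eq_take_iff_ptwise] at this
      intro k hk
      have h2 := this k hk
      rw [List.getElem?_drop] at h2
      exact h2
    · intro hpt
      apply periodic_rep L hL nN (cs.drop i) hlen'
      rw [take_eq_take_iff_ptwise]
      intro k hk
      rw [List.getElem?_drop]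
      exact hpt k hk
  rw [← Bool.coe_iff_coe, hA, hB]
  exact hmid

-- countdown ranges: cons, nil and membership
theorem pyRange_neg_one_cons' (a b : Int) (h : b < a) :
    PySem.List.pyRange a b (-1) = a :: PySem.List.pyRange (a - 1) b (-1) := by
  rw [PySem.List.pyRange_neg_one, PySem.List.pyRange_neg_one]
  have h1 : (a - b).toNat = (a - 1 - b).toNat + 1 := by omega
  rw [h1, List.range_succ_eq_map, List.map_cons, List.map_map]
  simp only [Nat.cast_zero, sub_zero]
  congr 1
  apply List.map_congr_left
  intro k _
  simp [Nat.succ_eq_add_one]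
  omega

theorem pyRange_neg_one_nil' (a b : Int) (h : a ≤ b) : PySem.List.pyRange a b (-1) = [] := by
  rw [PySem.List.pyRange_neg_one]
  have : (a - b).toNat = 0 := by omega
  simp [this]

-- find? over a countdown range where the two predicates agree
theorem find_phase2 (p q : Int → Bool) (i : Int) (m : Nat)
    (heq : ∀ L : Int, 0 < L → L ≤ (m : Int) → p (i + L) = q L) :
    (PySem.List.pyRange (i + (m : Int)) i (-1)).find? p
      = Option.map (fun L => i + L) ((PySem.List.pyRange (m : Int) 0 (-1)).find? q) := by
  induction m with
  | zero =>
    rw [pyRange_neg_one_nil' _ _ (by omega), pyRange_neg_one_nil' _ _ (by omega)]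
    rfl
  | succ m ih =>
    rw [pyRange_neg_one_cons' (i + (m+1 : Nat)) i (by push_cast; omega),
        pyRange_neg_one_cons' ((m+1 : Nat) : Int) 0 (by push_cast; omega)]
    have harith : (i + ((m+1 : Nat) : Int)) - 1 = i + (m : Int) := by push_cast; ring
    have harith2 : (((m+1 : Nat) : Int)) - 1 = (m : Int) := by push_cast; ring
    rw [harith, harith2]
    have hp : p (i + ((m+1 : Nat) : Int)) = q ((m+1 : Nat) : Int) := by
      apply heq <;> push_cast <;> omega
    simp only [List.find?]
    rw [hp]
    cases hqv : q ((m+1 : Nat) : Int) with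
    | true => rfl
    | false => exact ih (fun L h1 h2 => heq L h1 (by push_cast at *; omega))

-- dropping a segment of the countdown on which the predicate is false
theorem find_phase1 (p : Int → Bool) (i : Int) (m : Nat) (k : Nat)
    (hf : ∀ L : Int, (m : Int) < L → L ≤ (m : Int) + (k : Int) → p (i + L) = false) :
    (PySem.List.pyRange (i + (m : Int) + (k : Int)) i (-1)).find? p
      = (PySem.List.pyRange (i + (m : Int)) i (-1)).find? p := by
  induction k with
  | zero => simp
  | succ k ih =>
    rw [pyRange_neg_one_cons' (i + (m : Int) + ((k+1 : Nat) : Int)) i (by push_cast; omega)]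
    have harith : (i + (m : Int) + ((k+1 : Nat) : Int)) - 1 = i + (m : Int) + (k : Int) := by
      push_cast; ring
    rw [harith]
    have hp : p (i + (m : Int) + ((k+1 : Nat) : Int)) = false := by
      have := hf ((m : Int) + ((k+1:Nat) : Int)) (by push_cast; omega) (by push_cast; omega)
      rw [← this]; congr 1; ring
    simp only [List.find?]
    rw [hp]
    exact ih (fun L h1 h2 => hf L h1 (by push_cast at *; omega))

-- the two searches return the same block (B's as an offset from i)
theorem find_eq (cs : List Char) (nN : Nat) (hn : 1 ≤ nN) (i : Nat) (hi : i < cs.length) :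
    findA cs (nN : Int) (i : Int)
      = Option.map (fun L => (i : Int) + L) (findB cs (nN : Int) (i : Int)) := by
  unfold findA findB
  set rem := cs.length - i with hrem
  set q := rem / nN with hq
  have hql : q ≤ rem := Nat.div_le_self _ _
  have h1 : ((cs.length : Nat) : Int) = (i : Int) + (q : Int) + ((rem - q : Nat) : Int) := by
    push_cast; omega
  rw [h1]
  rw [find_phase1 (condA cs (nN : Int) (i : Int)) (i : Int) q (rem - q) ?_]
  · rw [find_phase2 (condA cs (nN : Int) (i : Int)) (condB cs (nN : Int) (i : Int)) (i : Int) q ?_]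
    · have h2 : ((i : Int) + (q : Int) + ((rem - q : Nat) : Int) - (i : Int)) = ((rem : Nat) : Int) := by push_cast; omega
      rw [h2, PySem.Int.floordiv_natCast]
    · intro L h0 hLq
      obtain ⟨LN, rfl⟩ : ∃ k : Nat, L = (k : Int) := ⟨L.toNat, by omega⟩
      exact condA_eq_condB cs nN hn i LN (Nat.succ_le_of_lt (by exact_mod_cast h0)) (Nat.cast_le.mp hLq)
  · intro L hgt hle
    have hq0 : (0:Int) ≤ (q : Int) := Int.natCast_nonneg q
    obtain ⟨LN, rfl⟩ : ∃ k : Nat, L = (k : Int) := ⟨L.toNat, by omega⟩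
    exact condA_false cs nN hn i LN (Nat.cast_lt.mp hgt)
      (by push_cast at hle; omega)

-- ---------- B-side: the table holds maxSkip ----------

theorem lcpD_ge_iff (cs : List Char) (L : Nat) : ∀ (t i : Nat),
    (t ≤ lcpD cs L i ↔ ∀ k < t, i + L + k < cs.length ∧ cs[i+k]? = cs[i+L+k]?) := by
  intro t
  induction t with
  | zero => intro i; simp
  | succ t ih =>
    intro i
    rw [lcpD]
    by_cases h : i + L < cs.length ∧ cs[i]? = cs[i+L]?
    · rw [dif_pos h]
      constructor
      · intro hle k hk
        match k with
        | 0 => simpa using h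
        | k+1 =>
          have := (ih (i+1)).mp (by omega) k (by omega)
          constructor
          · omega
          · have e1 : i + 1 + k = i + (k+1) := by omega
            have e2 : i + 1 + L + k = i + L + (k+1) := by omega
            rw [e1, e2] at this
            exact this.2
      · intro hall
        have : t ≤ lcpD cs L (i+1) := by
          rw [ih (i+1)]
          intro k hk
          have := hall (k+1) (by omega)
          constructor
          · omega
          · have e1 : i + (k+1) = i + 1 + k := by omega
            have e2 : i + L + (k+1) = i + 1 + L + k := by omega
            rw [e1, e2] at this
            exact this.2
        omega
    · rw [dif_neg h]
      constructor
      · omega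
      · intro hall
        exact absurd (by simpa using hall 0 (by omega)) h

-- condN agrees with condB whenever the n-fold block fits
theorem condN_iff_condB (cs : List Char) (nN L i : Nat) (hn : 1 ≤ nN) (hL : 1 ≤ L)
    (hfit : nN * L + i ≤ cs.length) :
    condN cs nN L i = true ↔ condB cs (nN : Int) (i : Int) (L : Int) = true := by
  obtain ⟨p, rfl⟩ : ∃ p, nN = p + 1 := ⟨nN - 1, by omega⟩
  have hB : (condB cs ((p+1 : Nat) : Int) (i : Int) (L : Int) = true) ↔
      (∀ k < p * L, cs[i+k]? = cs[i+L+k]?) := by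
    unfold condB
    rw [List.all_eq_true]
    constructor
    · intro h k hk
      have hmem : ((k : Nat) : Int) ∈ PySem.List.pyRange 0 ((((p+1:Nat) : Int) - 1) * (L : Int)) 1 := by
        rw [PySem.List.mem_pyRange_one]
        refine ⟨by positivity, ?_⟩
        have e : (((p+1:Nat) : Int) - 1) * (L : Int) = ((p * L : Nat) : Int) := by push_cast; ring
        rw [e]; exact_mod_cast hk
      have h2 := h _ hmem
      rw [show ((i : Int) + (L : Int) + (k : Int)) = (((i + L + k : Nat)) : Int) by push_cast; ring,
          show ((i : Int) + (k : Int)) = (((i + k : Nat)) : Int) by push_cast; ring] at h2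
      rw [PySem.List.pyGet?_natCast, PySem.List.pyGet?_natCast, beq_iff_eq] at h2
      exact h2.symm
    · intro h x hx
      have hb := PySem.List.mem_pyRange_one.mp hx
      obtain ⟨k, rfl⟩ : ∃ k : Nat, x = (k : Int) := ⟨x.toNat, by omega⟩
      have hk : k < p * L := by
        have e : (((p+1:Nat) : Int) - 1) * (L : Int) = ((p * L : Nat) : Int) := by push_cast; ring
        rw [e] at hb
        exact_mod_cast hb.2
      have h2 := (h k hk).symm
      rw [show ((i : Int) + (L : Int) + (k : Int)) = (((i + L + k : Nat)) : Int) by push_cast; ring,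
          show ((i : Int) + (k : Int)) = (((i + k : Nat)) : Int) by push_cast; ring]
      rw [PySem.List.pyGet?_natCast, PySem.List.pyGet?_natCast, beq_iff_eq]
      exact h2
  rw [hB, condN_iff]
  simp only [Nat.add_sub_cancel]
  constructor
  · rintro ⟨_, h2⟩ k hk
    exact ((lcpD_ge_iff cs L (p * L) i).mp h2 k hk).2
  · intro h
    refine ⟨hfit, (lcpD_ge_iff cs L (p * L) i).mpr ?_⟩
    intro k hk
    refine ⟨?_, h k hk⟩
    have e : L + p * L = (p + 1) * L := by ring
    omega

-- maxSkip stabilises beyond (m-i)/nN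
theorem maxSkip_stable (cs : List Char) (nN : Nat) (hn : 1 ≤ nN) (i : Nat) :
    ∀ q, (cs.length - i) / nN ≤ q → maxSkip cs nN q i = maxSkip cs nN ((cs.length - i) / nN) i := by
  intro q
  induction q with
  | zero => intro h; simp only [Nat.le_zero] at h; rw [h]
  | succ q ih =>
    intro h
    by_cases hr : (cs.length - i) / nN ≤ q
    · rw [maxSkip, if_neg, ih hr]
      intro hc
      rw [condN_iff] at hc
      have h1 := hc.1
      have h2 : q + 1 ≤ (cs.length - i) / nN := by
        rw [Nat.le_div_iff_mul_le (by omega)]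
        have := Nat.mul_comm nN (q + 1)
        omega
      omega
    · congr 1; omega

-- the descending search equals the maximum recorded in the table
theorem findB_eq_maxSkip (cs : List Char) (nN : Nat) (hn : 1 ≤ nN) (i : Nat) :
    ∀ r, r ≤ (cs.length - i) / nN →
    (PySem.List.pyRange (r : Int) 0 (-1)).find? (condB cs (nN : Int) (i : Int))
      = (if maxSkip cs nN r i = 0 then none else some ((maxSkip cs nN r i : Nat) : Int)) := by
  intro r
  induction r with
  | zero =>
    intro _
    rw [pyRange_neg_one_nil' _ _ (by omega)]
    rfl
  | succ r ih =>
    intro hle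
    have hfit : nN * (r + 1) + i ≤ cs.length := by
      have h2 : (r + 1) * nN ≤ cs.length - i := by
        rw [← Nat.le_div_iff_mul_le (by omega)]; exact hle
      have hcm := Nat.mul_comm nN (r + 1)
      have hnn : 1 * 1 ≤ (r + 1) * nN := Nat.mul_le_mul (by omega) (by omega)
      omega
    rw [pyRange_neg_one_cons' _ _ (by push_cast; omega)]
    have e : ((r + 1 : Nat) : Int) - 1 = (r : Nat) := by push_cast; ring
    rw [e]
    simp only [List.find?]
    have hcb := condN_iff_condB cs nN (r+1) i hn (by omega) hfit
    by_cases hc : condN cs nN (r+1) i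
    · rw [hcb.mp hc]
      rw [maxSkip, if_pos hc]
      simp
    · have : condB cs (nN : Int) (i : Int) ((r+1 : Nat) : Int) = false := by
        cases hcv : condB cs (nN : Int) (i : Int) ((r+1 : Nat) : Int)
        · rfl
        · exact absurd (hcb.mpr hcv) hc
      rw [this, ih (by omega), maxSkip, if_neg hc]

-- a nonzero table value satisfies its own condition
theorem maxSkip_cond (cs : List Char) (nN : Nat) (i : Nat) :
    ∀ q, maxSkip cs nN q i ≠ 0 → condN cs nN (maxSkip cs nN q i) i = true ∧ 1 ≤ maxSkip cs nN q i := by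
  intro q
  induction q with
  | zero => intro h; exact absurd rfl h
  | succ q ih =>
    intro h
    rw [maxSkip] at *
    by_cases hc : condN cs nN (q+1) i
    · rw [if_pos hc] at *; exact ⟨hc, by omega⟩
    · rw [if_neg hc] at *; exact ih h

-- the descending index list of B's inner pass
theorem descList_succ (k : Nat) :
    (List.range (k+1+1)).map (fun t => k + 1 - t) = (k+1) :: (List.range (k+1)).map (fun t => k - t) := by
  rw [List.range_succ_eq_map, List.map_cons, List.map_map]
  simp only [Nat.sub_zero]
  congr 1
  apply List.map_congr_left
  intro t _
  simp only [Function.comp_apply]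
  omega

-- one step of B's inner pass, entered with the correct run value
theorem stepB_run (cs : List Char) (nN : Nat) (hn : 1 ≤ nN) (L : Nat) (i : Nat) (best : List Nat) :
    stepB cs (nN : Int) L (lcpD cs L (i+1), best) i
    = (lcpD cs L i, if condN cs nN L i then best.set i L else best) := by
  unfold stepB
  have hrun : (if i + L < cs.length ∧ cs[i]? = cs[i+L]? then lcpD cs L (i+1) + 1 else 0) = lcpD cs L i := by
    conv_rhs => rw [lcpD]
    by_cases h : i + L < cs.length ∧ cs[i]? = cs[i+L]?
    · rw [if_pos h, dif_pos h]
    · rw [if_neg h, dif_neg h]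
  simp only [hrun]
  have hiff : ((nN : Int) * (L : Int) ≤ (cs.length : Int) - (i : Int) ∧
      ((nN : Int) - 1) * (L : Int) ≤ ((lcpD cs L i : Nat) : Int)) ↔ condN cs nN L i = true := by
    rw [condN_iff]
    have e : (nN : Int) - 1 = ((nN - 1 : Nat) : Int) := by omega
    rw [e]
    constructor
    · rintro ⟨h1, h2⟩
      constructor
      · have h1' : ((nN * L : Nat) : Int) ≤ (cs.length : Int) - (i : Int) := by push_cast; exact h1
        omega
      · have h2' : (((nN - 1) * L : Nat) : Int) ≤ ((lcpD cs L i : Nat) : Int) := by push_cast; exact h2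
        exact_mod_cast h2'
    · rintro ⟨h1, h2⟩
      constructor
      · have h1' : ((nN * L : Nat) : Int) ≤ (cs.length : Int) - (i : Int) := by
          have : ((nN * L : Nat) : Int) + (i : Int) ≤ (cs.length : Int) := by exact_mod_cast h1
          omega
        calc (nN : Int) * (L : Int) = ((nN * L : Nat) : Int) := by push_cast; ring
          _ ≤ _ := h1'
      · calc ((nN - 1 : Nat) : Int) * (L : Int) = (((nN - 1) * L : Nat) : Int) := by push_cast; ring
          _ ≤ ((lcpD cs L i : Nat) : Int) := by exact_mod_cast h2
  rw [if_congr hiff rfl rfl]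

-- B's inner pass writes L exactly where condN holds
theorem inner_fold (cs : List Char) (nN : Nat) (hn : 1 ≤ nN) (L : Nat) (hL : 1 ≤ L) :
    ∀ (k : Nat), k + L ≤ cs.length → ∀ (best : List Nat), best.length = cs.length →
    (((List.range (k+1)).map (fun t => k - t)).foldl
      (stepB cs (nN : Int) L) (lcpD cs L (k+1), best)).2.length = cs.length ∧
    ∀ j, (((List.range (k+1)).map (fun t => k - t)).foldl
      (stepB cs (nN : Int) L) (lcpD cs L (k+1), best)).2[j]?
      = if j ≤ k ∧ condN cs nN L j then some L else best[j]? := by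
  intro k
  induction k with
  | zero =>
    intro hk best hlen
    have hl0 : (List.range (0+1)).map (fun t => 0 - t) = [0] := by simp
    rw [hl0, List.foldl_cons, stepB_run cs nN hn L 0 best, List.foldl_nil]
    have h0 : 0 < best.length := by omega
    constructor
    · split_ifs <;> simp [hlen]
    · intro j
      by_cases hc : condN cs nN L 0
      · rw [if_pos hc]
        by_cases hj : j = 0
        · subst hj
          rw [if_pos ⟨le_refl _, hc⟩]
          simp [List.getElem?_set_self, h0]
        · rw [if_neg (by rintro ⟨h1, -⟩; exact hj (by omega))]
          exact List.getElem?_set_ne (by omega)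
      · have hneg : ¬ (j ≤ 0 ∧ condN cs nN L j) := by
          rintro ⟨h1, h2⟩
          obtain rfl : j = 0 := Nat.le_zero.mp h1
          exact hc h2
        rw [if_neg hc, if_neg hneg]
  | succ k ih =>
    intro hk best hlen
    rw [descList_succ k, List.foldl_cons, stepB_run cs nN hn L (k+1) best]
    have hklen : k + 1 < cs.length := by omega
    set best' := if condN cs nN L (k+1) then best.set (k+1) L else best with hbd
    have hlen' : best'.length = cs.length := by rw [hbd]; split_ifs <;> simp [hlen]
    obtain ⟨ihl, ihe⟩ := ih (by omega) best' hlen'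
    refine ⟨ihl, fun j => ?_⟩
    rw [ihe j]
    by_cases hc1 : j ≤ k ∧ condN cs nN L j
    · rw [if_pos hc1, if_pos ⟨by omega, hc1.2⟩]
    · rw [if_neg hc1]
      by_cases hc2 : j = k + 1 ∧ condN cs nN L j
      · obtain ⟨rfl, hcj⟩ := hc2
        rw [if_pos ⟨le_refl _, hcj⟩, hbd, if_pos hcj]
        simp [List.getElem?_set_self, hlen, hklen]
      · rw [if_neg (fun hand => (Nat.lt_or_ge j (k+1)).elim
            (fun h => hc1 ⟨by omega, hand.2⟩) (fun h => hc2 ⟨by omega, hand.2⟩))]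
        rw [hbd]
        split_ifs with hck
        · refine List.getElem?_set_ne ?_
          intro he
          exact hc2 ⟨he.symm, he ▸ hck⟩
        · rfl

-- after the passes L = 1 … q the table holds maxSkip q
theorem table_spec (cs : List Char) (nN : Nat) (hn : 1 ≤ nN) :
    ∀ q, q * nN ≤ cs.length →
    (((List.range q).map (· + 1)).foldl (fun best L => innerB cs (nN : Int) L best)
        (List.replicate cs.length 0)).length = cs.length ∧
    ∀ j, (((List.range q).map (· + 1)).foldl (fun best L => innerB cs (nN : Int) L best)
        (List.replicate cs.length 0))[j]?
      = if j < cs.length then some (maxSkip cs nN q j) else none := by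
  intro q
  induction q with
  | zero =>
    intro _
    refine ⟨by simp, fun j => ?_⟩
    simp [maxSkip, List.getElem?_replicate]
  | succ q ih =>
    intro hq
    have hmono : q * nN ≤ (q + 1) * nN := Nat.mul_le_mul_right _ (by omega)
    have hq1' : q + 1 ≤ (q + 1) * nN := Nat.le_mul_of_pos_right _ (by omega)
    have hq1 : q + 1 ≤ cs.length := by omega
    simp only [innerB] at ih ⊢
    obtain ⟨ihl, ihe⟩ := ih (by omega)
    rw [List.range_succ, List.map_append, List.foldl_append]
    simp only [List.map_cons, List.map_nil, List.foldl_cons, List.foldl_nil]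
    have hz : lcpD cs (q+1) (cs.length - (q+1) + 1) = 0 := by
      rw [lcpD, dif_neg]
      rintro ⟨h1, -⟩
      omega
    have hif := inner_fold cs nN hn (q+1) (by omega) (cs.length - (q+1)) (by omega)
      (((List.range q).map (· + 1)).foldl
        (fun best L => (((List.range (cs.length - L + 1)).map (fun t => cs.length - L - t)).foldl
          (stepB cs (nN : Int) L) (0, best)).2)
        (List.replicate cs.length 0)) ihl
    rw [hz] at hif
    obtain ⟨hl2, he2⟩ := hif
    refine ⟨hl2, fun j => ?_⟩
    rw [he2 j]
    by_cases hc : condN cs nN (q+1) j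
    · have h1 := ((condN_iff cs nN (q+1) j).mp hc).1
      have h2 : q + 1 ≤ nN * (q + 1) := Nat.le_mul_of_pos_left _ (by omega)
      rw [if_pos ⟨by omega, hc⟩, if_pos (by omega : j < cs.length)]
      simp only [maxSkip]
      rw [if_pos hc]
    · rw [if_neg (by rintro ⟨-, hcj⟩; exact hc hcj), ihe j]
      simp only [maxSkip]
      rw [if_neg hc]

-- ---------- the loops agree ----------

theorem loop_eq (cs : List Char) (nN : Nat) (hn : 1 ≤ nN) :
    ∀ (fuel : Nat) (i : Nat) (res : List Char),
      loopA cs (nN : Int) fuel (i : Int) res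
        = loopC cs (nN : Int) (bestTable cs (nN : Int)) fuel i res := by
  have htb : ∀ j < cs.length,
      (bestTable cs (nN : Int)).getD j 0 = maxSkip cs nN (cs.length / nN) j := by
    intro j hj
    unfold bestTable
    rw [show ((cs.length : Nat) : Int) = ((cs.length : Nat) : Int) from rfl]
    rw [PySem.Int.floordiv_natCast, Int.toNat_natCast]
    have := (table_spec cs nN hn (cs.length / nN) (Nat.div_mul_le_self _ _)).2 j
    rw [List.getD_eq_getElem?_getD, this, if_pos hj]
    rfl
  intro fuel
  induction fuel with
  | zero => intro i res; rfl
  | succ fuel ih =>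
    intro i res
    rw [loopA, loopC]
    by_cases hi : i < cs.length
    · rw [if_pos (by exact_mod_cast hi), if_pos hi]
      have hst := maxSkip_stable cs nN hn i (cs.length / nN)
        (Nat.div_le_div_right (by omega))
      set bs := maxSkip cs nN ((cs.length - i) / nN) i with hbs
      have hget : (bestTable cs (nN : Int)).getD i 0 = bs := by rw [htb i hi, hst]
      have hfb : findB cs (nN : Int) (i : Int)
          = (if bs = 0 then none else some ((bs : Nat) : Int)) := by
        unfold findB
        rw [show ((cs.length : Nat) : Int) - (i : Int) = ((cs.length - i : Nat) : Int) by
              push_cast; omega,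
            PySem.Int.floordiv_natCast]
        exact findB_eq_maxSkip cs nN hn i ((cs.length - i) / nN) (le_refl _)
      have hfa := find_eq cs nN hn i hi
      rw [hfb] at hfa
      by_cases hz : bs = 0
      · rw [if_pos hz] at hfa
        rw [hfa]
        simp only [Option.map_none]
        rw [hget, if_neg (by omega)]
        rw [show ((i : Int) + 1) = ((i + 1 : Nat) : Int) by push_cast; ring]
        rw [PySem.List.pyGet?_natCast]
        exact ih (i+1) _
      · rw [if_neg hz] at hfa
        rw [hfa]
        simp only [Option.map_some]
        obtain ⟨hcond, hbs1⟩ := maxSkip_cond cs nN i ((cs.length - i) / nN) hz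
        rw [condN_iff] at hcond
        rw [← hbs] at hcond
        have hfit := hcond.1
        have hble : bs ≤ nN * bs := Nat.le_mul_of_pos_left _ (by omega)
        have hsub : (PySem.List.slice cs (some (i : Int)) (some ((i : Int) + (bs : Int)))).length = bs := by
          rw [PySem.List.slice_natCast_add]
          simp
          omega
        rw [hsub, hget, if_pos hz]
        rw [show ((i : Int) + (bs : Int) * (nN : Int)) = ((i + ((nN : Int).toNat * bs) : Nat) : Int) by
              rw [Int.toNat_natCast]; push_cast; ring]
        exact ih _ _
    · rw [if_neg (by exact_mod_cast hi), if_neg hi]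

-- ===== VERDICT (by name: the statement is the Claim_ definition above) =====
theorem remove_redundancy_spec : Claim_equal_remove_redundancy := by
  intro s n _ hpre
  unfold Spec_remove_redundancy remove_redundancy remove_redundancy_alt
  rcases hpre with h | ⟨hs, -⟩
  · have hn : n = ((n.toNat : Nat) : Int) := by omega
    rw [hn]
    exact congrArg String.ofList (loop_eq s.toList n.toNat (by omega) _ 0 [])
  · subst hs
    simp [loopA, loopC]
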